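-- pv_equiv track=rewrite | github.com/kcerauno/voynich_analysis | src/analyze_roots.py | extract_root
-- ===== SOURCE A (Python) =====
-- PREFIXES = sorted(['qo', 'ch', 'sh', 'ok', 'ot', 'da', 'o', 'c', 'q', 's', 'd'], key=len, reverse=True)
--
-- SUFFIXES = sorted(['dy', 'in', 'ey', 'ol', 'ar', 'y', 'n', 'l', 'r'], key=len, reverse=True)
--
-- def extract_root(word):
--     prefix = ""
--     suffix = ""
--     root = word
--
--     # Strip prefix
--     for p in PREFIXES:
--         if root.startswith(p):
--             prefix = p
--             root = root[len(p):]
--             break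
--
--     # Strip suffix
--     for s in SUFFIXES:
--         if root.endswith(s):
--             suffix = s
--             root = root[:-len(s)]
--             break
--
--     return prefix, root, suffix
-- ===== SOURCE B (Python) =====
-- # Trie-style character dispatch: every two-char affix extends a one-char affix,
-- # so longest match = "first char is an affix; take two chars iff the neighbour
-- # continues it".  No scan over candidate affixes at all.
-- _PREFIX_NEXT = {'q': 'o', 'c': 'h', 's': 'h', 'o': 'kt', 'd': 'a'}
-- _SUFFIX_PREV = {'y': 'de', 'n': 'i', 'l': 'o', 'r': 'a'}
--
--
-- def extract_root(word):
--     prefix, root = "", word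
--     if root and root[0] in _PREFIX_NEXT:
--         k = 2 if len(root) >= 2 and root[1] in _PREFIX_NEXT[root[0]] else 1
--         prefix, root = root[:k], root[k:]
--     suffix = ""
--     if root and root[-1] in _SUFFIX_PREV:
--         k = 2 if len(root) >= 2 and root[-2] in _SUFFIX_PREV[root[-1]] else 1
--         suffix, root = root[-k:], root[:-k]
--     return prefix, root, suffix
-- ===== Notes on version B (the rewrite author's own statement) =====
-- stated objective: alternative
-- what changed: A scans the length-sorted affix lists calling startswith/endswith per candidate; B has no candidate loop at all: it looks the boundary character up in a trie-style dict (first char -> continuation chars, last char -> preceding chars) and takes two characters iff the neighbour continues the match, which is exact because every two-char affix here extends a one-char affix.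
import Mathlib
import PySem

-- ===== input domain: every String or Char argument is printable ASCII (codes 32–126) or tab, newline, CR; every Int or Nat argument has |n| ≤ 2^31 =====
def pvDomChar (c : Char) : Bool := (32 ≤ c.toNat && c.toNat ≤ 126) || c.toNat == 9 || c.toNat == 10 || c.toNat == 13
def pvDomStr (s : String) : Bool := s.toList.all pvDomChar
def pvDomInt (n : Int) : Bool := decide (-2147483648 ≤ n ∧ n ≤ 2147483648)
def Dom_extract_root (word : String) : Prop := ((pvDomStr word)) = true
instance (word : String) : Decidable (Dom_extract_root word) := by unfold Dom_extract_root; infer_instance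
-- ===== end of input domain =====

-- B replaces A's scan over the length-sorted candidate lists by a character-trie
-- dispatch (boundary-char lookup plus one continuation test): an alternative
-- decomposition, exact because every two-char affix extends a one-char affix.

-- ===== PORT A =====
def PREFIXES : List String := ["qo", "ch", "sh", "ok", "ot", "da", "o", "c", "q", "s", "d"]

def SUFFIXES : List String := ["dy", "in", "ey", "ol", "ar", "y", "n", "l", "r"]

-- 'for p in PREFIXES: if root.startswith(p): prefix = p; root = root[len(p):]; break'
def stripPrefixA : List String → String → String × String
  | [], root => ("", root)
  | p :: ps, root =>
    if PySem.Str.startswith root p then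
      (p, PySem.Str.slice root (some (PySem.Str.len p)) none)
    else stripPrefixA ps root

-- 'for s in SUFFIXES: if root.endswith(s): suffix = s; root = root[:-len(s)]; break'
def stripSuffixA : List String → String → String × String
  | [], root => ("", root)
  | s :: ss, root =>
    if PySem.Str.endswith root s then
      (s, PySem.Str.slice root none (some (-(PySem.Str.len s))))
    else stripSuffixA ss root

def extract_root (word : String) : String × String × String :=
  let pr := stripPrefixA PREFIXES word
  let sr := stripSuffixA SUFFIXES pr.2
  (pr.1, sr.2, sr.1)

-- ===== PORT B =====
-- Source B's dicts: first prefix char -> continuation chars, last suffix char ->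
-- preceding chars (Python's 1-char strings are Char here; 'c1 in <short str>'
-- is char membership in the value's chars)
def PREFIX_NEXT : List (Char × List Char) := [('q', ['o']), ('c', ['h']), ('s', ['h']), ('o', ['k', 't']), ('d', ['a'])]

def SUFFIX_PREV : List (Char × List Char) := [('y', ['d', 'e']), ('n', ['i']), ('l', ['o']), ('r', ['a'])]

-- 'if root and root[0] in _PREFIX_NEXT: k = 2 if len(root) >= 2 and root[1] in _PREFIX_NEXT[root[0]] else 1; prefix, root = root[:k], root[k:]'
def stripPreB (root : String) : String × String :=
  match PySem.Str.pyGet? root 0 with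
  | none => ("", root)
  | some c =>
    match PREFIX_NEXT.lookup c with
    | none => ("", root)
    | some nxt =>
      let k : Int :=
        if 2 ≤ PySem.Str.len root &&
            (match PySem.Str.pyGet? root 1 with
             | some c1 => nxt.contains c1
             | none => false) then 2 else 1
      (PySem.Str.slice root none (some k), PySem.Str.slice root (some k) none)

-- 'if root and root[-1] in _SUFFIX_PREV: k = 2 if len(root) >= 2 and root[-2] in _SUFFIX_PREV[root[-1]] else 1; suffix, root = root[-k:], root[:-k]'
def stripSufB (root : String) : String × String :=
  match PySem.Str.pyGet? root (-1) with
  | none => ("", root)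
  | some c =>
    match SUFFIX_PREV.lookup c with
    | none => ("", root)
    | some prv =>
      let k : Int :=
        if 2 ≤ PySem.Str.len root &&
            (match PySem.Str.pyGet? root (-2) with
             | some c2 => prv.contains c2
             | none => false) then 2 else 1
      (PySem.Str.slice root (some (-k)) none, PySem.Str.slice root none (some (-k)))

def extract_root_alt (word : String) : String × String × String :=
  let pr := stripPreB word
  let sr := stripSufB pr.2
  (pr.1, sr.2, sr.1)

-- ===== PRECONDITION & SPEC =====
def Spec_extract_root (word : String) (out : String × String × String) : Prop := out = extract_root_alt word
instance (word : String) (out : String × String × String) : Decidable (Spec_extract_root word out) := by unfold Spec_extract_root; infer_instance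

-- ===== CLAIM (what is proved, stated in full; the proofs are below) =====
def Claim_equal_extract_root : Prop := ∀ (word : String), Dom_extract_root word → Spec_extract_root word (extract_root word)

-- ===== LEMMAS AND PROOFS =====

set_option maxHeartbeats 1000000 in
set_option maxRecDepth 16384 in
lemma prefix_eq (root : String) : stripPrefixA PREFIXES root = stripPreB root := by
  rcases hl : root.toList with _ | ⟨c, _ | ⟨d, t⟩⟩
  · have h0 : root = "" := by rw [← String.toList_inj]; simp [hl]
    subst h0; decide
  · simp only [stripPrefixA, stripPreB, PREFIXES, PREFIX_NEXT, PySem.Str.startswith_eq,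
      PySem.Str.len_eq, hl]
    simp [PySem.Chars.startswith, List.isPrefixOf, hl, List.lookup,
      ← String.toList_inj, PySem.Str.toList_slice, PySem.List.slice_to]
    by_cases hB : c = 'o' ∨ c = 'c' ∨ c = 'q' ∨ c = 's' ∨ c = 'd'
    · rcases hB with rfl|rfl|rfl|rfl|rfl <;>
        simp [← String.toList_inj, PySem.Str.toList_slice, PySem.List.slice_to, hl]
    · push Not at hB
      obtain ⟨n1,n2,n3,n4,n5⟩ := hB
      have b1 : (c == 'q') = false := by simp [n3]
      have b2 : (c == 'c') = false := by simp [n2]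
      have b3 : (c == 's') = false := by simp [n4]
      have b4 : (c == 'o') = false := by simp [n1]
      have b5 : (c == 'd') = false := by simp [n5]
      simp [b1,b2,b3,b4,b5, Ne.symm n1, Ne.symm n2, Ne.symm n3, Ne.symm n4, Ne.symm n5]
  · simp only [stripPrefixA, stripPreB, PREFIXES, PREFIX_NEXT, PySem.Str.startswith_eq,
      PySem.Str.len_eq, hl]
    simp [PySem.Chars.startswith, List.isPrefixOf, hl, List.lookup,
      ← String.toList_inj, PySem.Str.toList_slice, PySem.List.slice_to]
    have h2 : (2:Int) ≤ (t.length:Int) + 1 + 1 := by omega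
    simp only [h2, true_and]
    by_cases hA : (c = 'q' ∧ d = 'o') ∨ (c = 'c' ∧ d = 'h') ∨ (c = 's' ∧ d = 'h') ∨
        (c = 'o' ∧ d = 'k') ∨ (c = 'o' ∧ d = 't') ∨ (c = 'd' ∧ d = 'a')
    · rcases hA with ⟨rfl,rfl⟩|⟨rfl,rfl⟩|⟨rfl,rfl⟩|⟨rfl,rfl⟩|⟨rfl,rfl⟩|⟨rfl,rfl⟩ <;>
        simp [← String.toList_inj, PySem.Str.toList_slice, PySem.List.slice_to, hl]
    · by_cases hB : c = 'o' ∨ c = 'c' ∨ c = 'q' ∨ c = 's' ∨ c = 'd'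
      · push Not at hA
        obtain ⟨a1,a2,a3,a4,a5,a6⟩ := hA
        rcases hB with rfl|rfl|rfl|rfl|rfl <;>
          simp_all [eq_comm, ← String.toList_inj, PySem.Str.toList_slice, PySem.List.slice_to] <;>
          (try (rw [← hl]; simp))
      · push Not at hB
        obtain ⟨n1,n2,n3,n4,n5⟩ := hB
        have b1 : (c == 'q') = false := by simp [n3]
        have b2 : (c == 'c') = false := by simp [n2]
        have b3 : (c == 's') = false := by simp [n4]
        have b4 : (c == 'o') = false := by simp [n1]
        have b5 : (c == 'd') = false := by simp [n5]
        simp [b1,b2,b3,b4,b5, Ne.symm n1, Ne.symm n2, Ne.symm n3, Ne.symm n4, Ne.symm n5]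

set_option maxHeartbeats 1000000 in
set_option maxRecDepth 16384 in
lemma suffix_eq (root : String) : stripSuffixA SUFFIXES root = stripSufB root := by
  rcases hr : root.toList.reverse with _ | ⟨c, _ | ⟨d, t⟩⟩
  · have h0 : root = "" := by
      rw [← String.toList_inj]
      simpa using congrArg List.reverse hr
    subst h0; decide
  · have hl : root.toList = [c] := by
      simpa using congrArg List.reverse hr
    clear hr
    have e1 : PySem.List.slice [c] (some (-1)) none = [c] := by
      rw [PySem.List.slice_from_neg_one]; simp
    have f1 : PySem.List.slice [c] none (some (-1)) = ([] : List Char) := by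
      rw [PySem.List.slice_to_neg_one]; simp
    simp only [stripSuffixA, stripSufB, SUFFIXES, SUFFIX_PREV, PySem.Str.endswith_eq,
      PySem.Str.len_eq, hl]
    simp [PySem.Chars.endswith, List.isSuffixOf, List.isPrefixOf, hl, List.lookup,
      ← String.toList_inj, PySem.Str.toList_slice, e1, f1, PySem.List.pyGet?_neg_one]
    by_cases hB : c = 'y' ∨ c = 'n' ∨ c = 'l' ∨ c = 'r'
    · rcases hB with rfl|rfl|rfl|rfl <;>
        simp [← String.toList_inj, PySem.Str.toList_slice, e1, f1, hl]
    · push Not at hB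
      obtain ⟨n1,n2,n3,n4⟩ := hB
      have b1 : (c == 'y') = false := by simp [n1]
      have b2 : (c == 'n') = false := by simp [n2]
      have b3 : (c == 'l') = false := by simp [n3]
      have b4 : (c == 'r') = false := by simp [n4]
      simp [b1,b2,b3,b4, Ne.symm n1, Ne.symm n2, Ne.symm n3, Ne.symm n4]
  · have hl : root.toList = (c::d::t).reverse := by
      rw [← hr, List.reverse_reverse]
    clear hr
    have e2 : PySem.List.slice (t.reverse ++ [d, c]) (some (-2)) none = [d, c] := by
      rw [PySem.List.slice_from_neg_ofNat _ 2 (by omega),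
        show (t.reverse ++ [d, c]).length - 2 = t.reverse.length by simp, List.drop_left]
    have e1 : PySem.List.slice (t.reverse ++ [d, c]) (some (-1)) none = [c] := by
      rw [PySem.List.slice_from_neg_one,
        show t.reverse ++ [d, c] = (t.reverse ++ [d]) ++ [c] by simp,
        show ((t.reverse ++ [d]) ++ [c]).length - 1 = (t.reverse ++ [d]).length by simp,
        List.drop_left]
    have f2 : PySem.List.slice (t.reverse ++ [d, c]) none (some (-2)) = t.reverse := by
      rw [PySem.List.slice_to_neg_ofNat _ 2 (by omega),
        show (t.reverse ++ [d, c]).length - 2 = t.reverse.length by simp, List.take_left]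
    have f1 : PySem.List.slice (t.reverse ++ [d, c]) none (some (-1)) = t.reverse ++ [d] := by
      rw [PySem.List.slice_to_neg_one,
        show t.reverse ++ [d, c] = (t.reverse ++ [d]) ++ [c] by simp]
      simp
    have g1 : PySem.List.pyGet? (t.reverse ++ [d, c]) (-1) = some c := by
      rw [show t.reverse ++ [d, c] = (t.reverse ++ [d]) ++ [c] by simp,
        PySem.List.pyGet?_neg_one_append_singleton]
    have g2 : PySem.List.pyGet? (t.reverse ++ [d, c]) (-2) = some d := by
      rw [PySem.List.pyGet?_neg_ofNat _ 2 (by omega) (by simp)]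
      simp [show (t.reverse ++ [d, c]).length - 2 = t.reverse.length by simp,
        List.getElem?_append_right (by simp : t.reverse.length ≤ t.reverse.length)]
    simp only [stripSuffixA, stripSufB, SUFFIXES, SUFFIX_PREV, PySem.Str.endswith_eq,
      PySem.Str.len_eq, hl]
    simp [PySem.Chars.endswith, List.isSuffixOf, hl, List.isPrefixOf, List.lookup,
      ← String.toList_inj, PySem.Str.toList_slice, e2, e1, f2, f1, g1, g2]

    by_cases hA : (c = 'y' ∧ d = 'd') ∨ (c = 'n' ∧ d = 'i') ∨ (c = 'y' ∧ d = 'e') ∨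
        (c = 'l' ∧ d = 'o') ∨ (c = 'r' ∧ d = 'a')
    · rcases hA with ⟨rfl,rfl⟩|⟨rfl,rfl⟩|⟨rfl,rfl⟩|⟨rfl,rfl⟩|⟨rfl,rfl⟩ <;> simp [← String.toList_inj, PySem.Str.toList_slice, hl, e2, e1, f2, f1]
    · by_cases hB : c = 'y' ∨ c = 'n' ∨ c = 'l' ∨ c = 'r'
      · push Not at hA
        obtain ⟨a1,a2,a3,a4,a5⟩ := hA
        rcases hB with rfl|rfl|rfl|rfl
        · have nd : d ≠ 'd' := a1 rfl
          have ne' : d ≠ 'e' := a3 rfl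
          have m : (d ∈ (['d','e']:List Char)) ↔ False := by simp [nd, ne']
          simp [m, Ne.symm nd, Ne.symm ne', ← String.toList_inj, PySem.Str.toList_slice, hl, e1, f1]
        · have ni : d ≠ 'i' := a2 rfl
          have m : (d ∈ (['i']:List Char)) ↔ False := by simp [ni]
          simp [m, Ne.symm ni, ← String.toList_inj, PySem.Str.toList_slice, hl, e1, f1]
        · have no' : d ≠ 'o' := a4 rfl
          have m : (d ∈ (['o']:List Char)) ↔ False := by simp [no']
          simp [m, Ne.symm no', ← String.toList_inj, PySem.Str.toList_slice, hl, e1, f1]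
        · have na : d ≠ 'a' := a5 rfl
          have m : (d ∈ (['a']:List Char)) ↔ False := by simp [na]
          simp [m, Ne.symm na, ← String.toList_inj, PySem.Str.toList_slice, hl, e1, f1]
      · push Not at hB
        obtain ⟨n1,n2,n3,n4⟩ := hB
        have b1 : (c == 'y') = false := by simp [n1]
        have b2 : (c == 'n') = false := by simp [n2]
        have b3 : (c == 'l') = false := by simp [n3]
        have b4 : (c == 'r') = false := by simp [n4]
        simp [b1,b2,b3,b4, Ne.symm n1, Ne.symm n2, Ne.symm n3, Ne.symm n4]

-- ===== VERDICT (by name: the statement is the Claim_ definition above) =====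
theorem extract_root_spec : Claim_equal_extract_root := by
  intro word _
  unfold Spec_extract_root extract_root extract_root_alt
  simp only [prefix_eq, suffix_eq]
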